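-- pv_equiv track=rewrite | github.com/shalb/alertmanager-exporter | exporter/exporter.py | label_clean
-- ===== SOURCE A (Python) =====
-- def label_clean(label):
--     label = str(label)
--     replace_map = {
--         '\\': '',
--         '"': '',
--         '\n': '',
--         '\t': '',
--         '\r': '',
--         '-': '_',
--         ' ': '_'
--     }
--     for r in replace_map:
--         label = label.replace(r, replace_map[r])
--     return label
-- ===== SOURCE B (Python) =====
-- def label_clean(label):
--     label = str(label)
--     out = []
--     for ch in label:
--         if ch in '\\"\n\t\r':
--             continue
--         if ch == '-' or ch == ' ':
--             out.append('_')
--         else: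
--             out.append(ch)
--     return ''.join(out)
-- ===== Notes on version B (the rewrite author's own statement) =====
-- stated objective: alternative
-- what changed: Replaced the eight sequential full-string .replace scans driven by a dict by a single explicit loop over the characters with an if/elif drop/underscore/keep chain accumulating the output list, joined once at the end.
import Mathlib
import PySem

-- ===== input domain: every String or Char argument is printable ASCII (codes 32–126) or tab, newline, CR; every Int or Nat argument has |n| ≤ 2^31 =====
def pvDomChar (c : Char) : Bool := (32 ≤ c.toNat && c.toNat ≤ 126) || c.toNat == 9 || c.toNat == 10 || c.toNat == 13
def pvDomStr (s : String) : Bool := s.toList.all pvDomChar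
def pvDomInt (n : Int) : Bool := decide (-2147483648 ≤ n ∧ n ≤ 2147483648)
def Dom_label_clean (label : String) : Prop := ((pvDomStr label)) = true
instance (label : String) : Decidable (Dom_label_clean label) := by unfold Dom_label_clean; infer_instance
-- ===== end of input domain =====

-- B replaces A's eight sequential full-string .replace scans driven by a dict by one
-- explicit loop over the characters with a drop/underscore/keep if-chain and an output
-- accumulator joined at the end (alternative decomposition; not measured faster).

-- ===== PORT A =====
-- the dict literal replace_map of A
def replaceMapA : PySem.Dict String String :=
  PySem.Dict.ofList [("\\", ""), ("\"", ""), ("\n", ""), ("\t", ""), ("\r", ""), ("-", "_"), (" ", "_")]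

-- for r in replace_map: label = label.replace(r, replace_map[r])
def label_clean (label : String) : String :=
  replaceMapA.keys.foldl (fun lab r => PySem.Str.replace lab r (replaceMapA.getD r "")) label

-- ===== PORT B =====
-- the loop body: 'continue' on dropped chars, append '_' on '-'/' ', else append ch
def cleanStep (out : List Char) (c : Char) : List Char :=
  if c = '\\' ∨ c = '"' ∨ c = '\n' ∨ c = '\t' ∨ c = '\r' then out
  else if c = '-' ∨ c = ' ' then out ++ ['_']
  else out ++ [c]

-- out = []; for ch in label: …; return ''.join(out)
def label_clean_alt (label : String) : String :=
  String.ofList (label.toList.foldl cleanStep [])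

-- ===== PRECONDITION & SPEC =====
def Spec_label_clean (label : String) (out : String) : Prop := out = label_clean_alt label
instance (label : String) (out : String) : Decidable (Spec_label_clean label out) := by unfold Spec_label_clean; infer_instance

-- ===== CLAIM (what is proved, stated in full; the proofs are below) =====
def Claim_equal_label_clean : Prop := ∀ (label : String), Dom_label_clean label → Spec_label_clean label (label_clean label)

-- ===== LEMMAS AND PROOFS =====

-- per-character result of B's loop body
def cleanChar (c : Char) : List Char :=
  if c = '\\' ∨ c = '"' ∨ c = '\n' ∨ c = '\t' ∨ c = '\r' then []
  else if c = '-' ∨ c = ' ' then ['_']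
  else [c]

theorem cleanStep_eq (out : List Char) (c : Char) : cleanStep out c = out ++ cleanChar c := by
  unfold cleanStep cleanChar
  split_ifs <;> simp

theorem foldl_cleanStep (l : List Char) :
    l.foldl cleanStep [] = l.flatMap cleanChar := by
  have : ∀ f, f = cleanStep → l.foldl f [] = [] ++ l.flatMap cleanChar := by
    intro f hf
    rw [hf, show cleanStep = (fun acc c => acc ++ cleanChar c) from funext fun a => funext fun c => cleanStep_eq a c]
    exact PySem.List.foldl_append_eq_flatMap cleanChar l []
  simpa using this cleanStep rfl

-- single-character old: replace.go is a character-wise flatMap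
theorem go_single (a : Char) (new : List Char) :
    ∀ (l acc : List Char) (fuel : Nat), l.length ≤ fuel →
      PySem.Chars.replace.go [a] new fuel l acc
        = acc.reverse ++ l.flatMap (fun c => if c = a then new else [c]) := by
  intro l
  induction l with
  | nil =>
      intro acc fuel _
      cases fuel <;> simp [PySem.Chars.replace.go]
  | cons c t ih =>
      intro acc fuel hf
      cases fuel with
      | zero => simp at hf
      | succ fuel =>
        simp only [PySem.Chars.replace.go]
        by_cases h : c = a
        · subst h
          rw [if_pos (by simp [List.isPrefixOf])]
          simp only [List.length_cons, List.length_nil, List.drop_succ_cons, List.drop_zero]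
          rw [ih _ fuel (by simpa using hf)]
          simp
        · rw [if_neg (by simp [List.isPrefixOf]; exact fun e => h e.symm)]
          rw [ih _ fuel (by simpa using hf)]
          simp [h]

theorem replace_single (l : List Char) (a : Char) (new : List Char) :
    PySem.Chars.replace l [a] new = l.flatMap (fun c => if c = a then new else [c]) := by
  rw [PySem.Chars.replace]
  rw [if_neg (by simp)]
  simpa using go_single a new l [] l.length le_rfl

theorem label_clean_toList (label : String) :
    (label_clean label).toList = label.toList.flatMap cleanChar := by
  rw [show ∀ lab, label_clean lab
        = PySem.Str.replace (PySem.Str.replace (PySem.Str.replace (PySem.Str.replace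
            (PySem.Str.replace (PySem.Str.replace (PySem.Str.replace lab "\\" "")
            "\"" "") "\n" "") "\t" "") "\r" "") "-" "_") " " "_"
      from fun _ => rfl]
  simp only [PySem.Str.toList_replace]
  simp only [show ("\\" : String).toList = ['\\'] from rfl,
             show ("\"" : String).toList = ['"'] from rfl,
             show ("\n" : String).toList = ['\n'] from rfl,
             show ("\t" : String).toList = ['\t'] from rfl,
             show ("\r" : String).toList = ['\r'] from rfl,
             show ("-" : String).toList = ['-'] from rfl,
             show (" " : String).toList = [' '] from rfl,
             show ("" : String).toList = [] from rfl,
             show ("_" : String).toList = ['_'] from rfl]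
  simp only [replace_single, List.flatMap_assoc]
  congr 1
  funext c
  unfold cleanChar
  by_cases h1 : c = '\\'; · subst h1; rfl
  by_cases h2 : c = '"';  · subst h2; rfl
  by_cases h3 : c = '\n'; · subst h3; rfl
  by_cases h4 : c = '\t'; · subst h4; rfl
  by_cases h5 : c = '\r'; · subst h5; rfl
  by_cases h6 : c = '-';  · subst h6; rfl
  by_cases h7 : c = ' ';  · subst h7; rfl
  simp [h1, h2, h3, h4, h5, h6, h7]

-- ===== VERDICT (by name: the statement is the Claim_ definition above) =====
theorem label_clean_spec : Claim_equal_label_clean := by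
  intro label _
  show label_clean label = label_clean_alt label
  apply String.toList_injective
  rw [label_clean_toList]
  simp [label_clean_alt, foldl_cleanStep]
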